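-- pv_equiv track=rewrite | github.com/NikiSuckau/omnimon | utilities/VBE/fix_monster_stages.py | build_character_lookup
-- ===== SOURCE A (Python) =====
-- def build_character_lookup(characters_data):
--     """Build a lookup table from character names to their folder/character info."""
--     lookup = {}
--
--     for char_info in characters_data:
--         char_name = char_info.get('character_name')
--         if char_name:
--             # Handle potential duplicates by using a list
--             if char_name not in lookup:
--                 lookup[char_name] = []
--             lookup[char_name].append({
--                 'folder_name': char_info['folder_name'],
--                 'character_number': char_info['character_number']
--             })
--
--     return lookup
-- ===== SOURCE B (Python) =====
-- def build_character_lookup(characters_data):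
--     """Build a lookup table from character names to their folder/character info."""
--     # Pass 1: distinct truthy names in first-occurrence order.
--     names = []
--     for char_info in characters_data:
--         name = char_info.get('character_name')
--         if name and name not in names:
--             names.append(name)
--     # Pass 2: one gathering scan per name.
--     return {name: [{'folder_name': c['folder_name'],
--                     'character_number': c['character_number']}
--                    for c in characters_data
--                    if c.get('character_name') == name]
--             for name in names}
-- ===== Notes on version B (the rewrite author's own statement) =====
-- stated objective: alternative
-- what changed: Replaces A's single-pass dict accumulation (membership-guarded insert + in-place append) with a two-phase pipeline: first collect the distinct truthy names in first-occurrence order, then build each name's group by an independent gathering scan over the whole input.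
import Mathlib
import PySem

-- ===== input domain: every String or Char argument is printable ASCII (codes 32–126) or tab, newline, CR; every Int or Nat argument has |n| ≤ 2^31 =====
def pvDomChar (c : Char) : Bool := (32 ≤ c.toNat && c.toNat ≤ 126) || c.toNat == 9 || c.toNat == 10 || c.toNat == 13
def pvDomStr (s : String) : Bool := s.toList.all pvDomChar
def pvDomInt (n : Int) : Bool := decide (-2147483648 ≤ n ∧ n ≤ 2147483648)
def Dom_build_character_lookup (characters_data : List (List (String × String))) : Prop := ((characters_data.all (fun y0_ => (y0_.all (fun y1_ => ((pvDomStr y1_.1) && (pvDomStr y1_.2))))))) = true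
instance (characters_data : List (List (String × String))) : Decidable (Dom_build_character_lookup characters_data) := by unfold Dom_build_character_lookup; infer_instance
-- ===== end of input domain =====

-- B replaces A's single-pass guarded dict accumulation by a two-phase pipeline
-- (distinct truthy names first, then one gathering scan per name); objective: alternative.

-- ===== PORT A =====
-- shared record literal: {'folder_name': ci['folder_name'], 'character_number': ci['character_number']}
-- (Pre_ guarantees both keys are present; outside Pre_ the Python raises KeyError)
def charEntry (ci : List (String × String)) : List (String × String) :=
  [("folder_name", ((PySem.Dict.mk ci).get? "folder_name").getD ""),
   ("character_number", ((PySem.Dict.mk ci).get? "character_number").getD "")]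

def build_character_lookup (characters_data : List (List (String × String))) : List (String × List (List (String × String))) :=
  (characters_data.foldl (fun lookup ci =>
    match (PySem.Dict.mk ci).get? "character_name" with
    | some n =>
        if n != "" then
          let lookup := if lookup.contains n then lookup else lookup.insert n []
          lookup.modify n [] (fun l => l ++ [charEntry ci])
        else lookup
    | none => lookup)
    (PySem.Dict.empty : PySem.Dict String (List (List (String × String))))).items

-- ===== PORT B =====
def build_character_lookup_alt (characters_data : List (List (String × String))) : List (String × List (List (String × String))) :=
  let names := characters_data.foldl (fun names ci =>
    match (PySem.Dict.mk ci).get? "character_name" with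
    | some n => if (n != "") && !(names.contains n) then names ++ [n] else names
    | none => names) []
  names.map (fun n => (n,
    characters_data.filterMap (fun ci =>
      if (PySem.Dict.mk ci).get? "character_name" = some n then some (charEntry ci) else none)))

-- ===== PRECONDITION & SPEC =====
-- Pre_ excludes exactly the inputs where the Python raises KeyError: a record whose
-- 'character_name' is truthy but which lacks 'folder_name' or 'character_number'.
def Pre_build_character_lookup (characters_data : List (List (String × String))) : Prop :=
  (characters_data.all (fun ci =>
    match (PySem.Dict.mk ci).get? "character_name" with
    | some n => (n == "") || ((PySem.Dict.mk ci).contains "folder_name" && (PySem.Dict.mk ci).contains "character_number")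
    | none => true)) = true

instance (characters_data : List (List (String × String))) : Decidable (Pre_build_character_lookup characters_data) := by
  unfold Pre_build_character_lookup; infer_instance

def pvWitness_build_character_lookup : (List (List (String × String))) :=
  [[("character_name", "agumon"), ("folder_name", "dm"), ("character_number", "1")],
   [("character_name", ""), ("x", "y")],
   [("character_name", "agumon"), ("folder_name", "dm2"), ("character_number", "2")]]

def Spec_build_character_lookup (characters_data : List (List (String × String))) (out : List (String × List (List (String × String)))) : Prop := out = build_character_lookup_alt characters_data
instance (characters_data : List (List (String × String))) (out : List (String × List (List (String × String)))) : Decidable (Spec_build_character_lookup characters_data out) := by unfold Spec_build_character_lookup; infer_instance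

-- ===== CLAIM (what is proved, stated in full; the proofs are below) =====
def Claim_equal_build_character_lookup : Prop := ∀ (characters_data : List (List (String × String))), Dom_build_character_lookup characters_data → Pre_build_character_lookup characters_data → Spec_build_character_lookup characters_data (build_character_lookup characters_data)

-- ===== LEMMAS AND PROOFS =====

-- the (name, entry) pairs of the truthy-named records, in input order
def pvEntries (cd : List (List (String × String))) : List (String × List (String × String)) :=
  cd.filterMap (fun ci =>
    match (PySem.Dict.mk ci).get? "character_name" with
    | some n => if n != "" then some (n, charEntry ci) else none
    | none => none)

theorem pvEntries_cons_none (ci : List (String × String)) (rest : List (List (String × String)))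
    (hg : (PySem.Dict.mk ci).get? "character_name" = none) :
    pvEntries (ci :: rest) = pvEntries rest := by
  simp [pvEntries, hg]

theorem pvEntries_cons_some (ci : List (String × String)) (rest : List (List (String × String)))
    {n : String} (hg : (PySem.Dict.mk ci).get? "character_name" = some n) (hn : (n != "") = true) :
    pvEntries (ci :: rest) = (n, charEntry ci) :: pvEntries rest := by
  simp [pvEntries, hg, bne_iff_ne.mp hn]

theorem pvEntries_cons_empty (ci : List (String × String)) (rest : List (List (String × String)))
    {n : String} (hg : (PySem.Dict.mk ci).get? "character_name" = some n) (hn : (n != "") = false) :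
    pvEntries (ci :: rest) = pvEntries rest := by
  simp [pvEntries, hg, bne_eq_false_iff_eq.mp hn]

-- the guarded insert before the append is redundant: modify handles a missing key the same way
theorem guard_insert_modify {ν : Type} (d : PySem.Dict String (List ν)) (n : String) (e : ν) :
    (if d.contains n then d else d.insert n []).modify n [] (fun l => l ++ [e]) = d.modify n [] (fun l => l ++ [e]) := by
  by_cases h : d.contains n
  · simp [h]
  · simp only [Bool.not_eq_true] at h
    simp [h, PySem.Dict.modify, PySem.Dict.getD_insert_self, PySem.Dict.insert_insert_self,
      PySem.Dict.getD_of_not_contains _ _ h]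

-- A's fold is the plain modify-append fold over pvEntries
theorem foldA_eq_entries (cd : List (List (String × String))) :
    ∀ d : PySem.Dict String (List (List (String × String))),
    cd.foldl (fun lookup ci =>
      match (PySem.Dict.mk ci).get? "character_name" with
      | some n =>
          if n != "" then
            let lookup := if lookup.contains n then lookup else lookup.insert n []
            lookup.modify n [] (fun l => l ++ [charEntry ci])
          else lookup
      | none => lookup) d
    = (pvEntries cd).foldl (fun d p => d.modify p.1 [] (fun l => l ++ [p.2])) d := by
  induction cd with
  | nil => intro d; rfl
  | cons ci rest ih =>
    intro d
    rw [List.foldl_cons]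
    cases hg : (PySem.Dict.mk ci).get? "character_name" with
    | none =>
      rw [pvEntries_cons_none ci rest hg]
      simpa only [hg] using ih d
    | some n =>
      by_cases hn : (n != "") = true
      · rw [pvEntries_cons_some ci rest hg hn, List.foldl_cons]
        simp only [hn, if_true]
        rw [guard_insert_modify]
        exact ih _
      · simp only [Bool.not_eq_true] at hn
        rw [pvEntries_cons_empty ci rest hg hn]
        simpa only [hg, hn, Bool.false_eq_true, if_false] using ih d

-- B's first pass computes Set.ofList of the entry names
theorem foldB_names (cd : List (List (String × String))) :
    ∀ acc : List String,
    cd.foldl (fun names ci =>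
      match (PySem.Dict.mk ci).get? "character_name" with
      | some n => if (n != "") && !(names.contains n) then names ++ [n] else names
      | none => names) acc
    = PySem.Set.update acc ((pvEntries cd).map (·.1)) := by
  induction cd with
  | nil => intro acc; simp [pvEntries, PySem.Set.update_nil]
  | cons ci rest ih =>
    intro acc
    rw [List.foldl_cons]
    cases hg : (PySem.Dict.mk ci).get? "character_name" with
    | none =>
      rw [pvEntries_cons_none ci rest hg]
      simpa only [hg] using ih acc
    | some n =>
      by_cases hn : (n != "") = true
      · rw [pvEntries_cons_some ci rest hg hn, List.map_cons, PySem.Set.update_cons]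
        have hadd : (if (n != "") && !(acc.contains n) then acc ++ [n] else acc) = PySem.Set.add acc n := by
          simp only [PySem.Set.add, PySem.Set.contains, hn, Bool.true_and]
          by_cases hc : acc.contains n <;> simp
        simp only [hadd]
        exact ih _
      · simp only [Bool.not_eq_true] at hn
        rw [pvEntries_cons_empty ci rest hg hn]
        simpa only [hg, hn, Bool.false_and, if_false] using ih acc

-- B's gathering scan for a truthy name equals filtering pvEntries by that name
theorem gather_eq_filter (n : String) (hn : n ≠ "") (cd : List (List (String × String))) :
    cd.filterMap (fun ci =>
      if (PySem.Dict.mk ci).get? "character_name" = some n then some (charEntry ci) else none)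
    = ((pvEntries cd).filter (fun p => p.1 == n)).map (·.2) := by
  induction cd with
  | nil => rfl
  | cons ci rest ih =>
    rw [List.filterMap_cons]
    cases hg : (PySem.Dict.mk ci).get? "character_name" with
    | none =>
      rw [pvEntries_cons_none ci rest hg]
      simp [ih]
    | some m =>
      by_cases hm : (m != "") = true
      · rw [pvEntries_cons_some ci rest hg hm, List.filter_cons]
        by_cases hmn : m = n
        · subst hmn; simp [ih]
        · simp [hmn, ih]
      · simp only [Bool.not_eq_true, bne_eq_false_iff_eq] at hm
        subst hm
        rw [pvEntries_cons_empty ci rest hg (by simp)]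
        simp [Ne.symm hn, ih]

theorem entries_fst_ne_empty (cd : List (List (String × String))) :
    ∀ p ∈ pvEntries cd, p.1 ≠ "" := by
  intro p hp
  simp only [pvEntries, List.mem_filterMap] at hp
  obtain ⟨ci, _, hci⟩ := hp
  cases hg : (PySem.Dict.mk ci).get? "character_name" with
  | none => rw [hg] at hci; simp at hci
  | some n =>
    rw [hg] at hci
    by_cases hn : (n != "") = true
    · simp only [hn, if_true, Option.some_inj] at hci
      subst hci; simpa using hn
    · simp [hn] at hci

-- ===== VERDICT (by name: the statement is the Claim_ definition above) =====
theorem build_character_lookup_spec : Claim_equal_build_character_lookup := by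
  intro cd _ _
  unfold Spec_build_character_lookup build_character_lookup build_character_lookup_alt
  rw [foldA_eq_entries, foldB_names]
  rw [PySem.Dict.items_eq_map_keys _ (by
        exact PySem.Dict.nodup_keys_foldl_modify_key (pvEntries cd) (·.1) []
          (fun d x l => l ++ [x.2]) PySem.Dict.empty (by simp [PySem.Dict.keys_empty])) []]
  rw [PySem.Dict.keys_foldl_modify_key (pvEntries cd) (·.1) [] (fun d x l => l ++ [x.2])]
  simp only [PySem.Dict.keys_empty, PySem.Set.update_nil_left]
  apply List.map_congr_left
  intro n hn
  have hne : n ≠ "" := by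
    rw [PySem.Set.mem_ofList] at hn
    obtain ⟨p, hp, hpn⟩ := List.mem_map.mp hn
    exact hpn ▸ entries_fst_ne_empty cd p hp
  rw [PySem.Dict.getD_foldl_modify_append, PySem.Dict.getD_empty, List.nil_append,
    gather_eq_filter n hne]
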